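-- pv_equiv track=rewrite | github.com/UnknownEquineCoderFH/PGI | pig/utils.py | break_sequence
-- ===== SOURCE A (Python) =====
-- from typing import Iterator, TYPE_CHECKING
--
-- def break_sequence(inp: str) -> Iterator[str]:
--     skips = 0
--
--     for idx, char in enumerate(inp):
--         if skips:
--             skips -= 1
--             continue
--
--         if char == "<":
--             closing_tag = inp.find(">", idx)
--
--             if closing_tag == -1:
--                 raise ValueError("Unclosed tag")
--
--             skips += closing_tag - idx
--
--             yield inp[idx : closing_tag + 1]
--         else:
--             yield char
-- ===== SOURCE B (Python) =====
-- def break_sequence(inp: str):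
--     """Tokenize inp, grouping <...> tags as single tokens.
--
--     Staged-splitting generator: repeatedly partition on '<' to emit the
--     plain text before the next tag, then partition on '>' to emit the
--     whole tag; no indices, no find, no per-character skip counter."""
--     rest = inp
--     while True:
--         head, sep, rest = rest.partition("<")
--         yield from head
--         if not sep:
--             return
--         body, sep2, rest = rest.partition(">")
--         if not sep2:
--             raise ValueError("Unclosed tag")
--         yield "<" + body + ">"
-- ===== Notes on version B (the rewrite author's own statement) =====
-- stated objective: alternative
-- what changed: Replaces the per-character enumerate loop with a countdown-skip counter by a staged-splitting loop that repeatedly str.partition's the remainder on '<' (yielding the plain-text head) and then on '>' (yielding the whole tag), with no indices and no per-character state.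
import Mathlib
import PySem

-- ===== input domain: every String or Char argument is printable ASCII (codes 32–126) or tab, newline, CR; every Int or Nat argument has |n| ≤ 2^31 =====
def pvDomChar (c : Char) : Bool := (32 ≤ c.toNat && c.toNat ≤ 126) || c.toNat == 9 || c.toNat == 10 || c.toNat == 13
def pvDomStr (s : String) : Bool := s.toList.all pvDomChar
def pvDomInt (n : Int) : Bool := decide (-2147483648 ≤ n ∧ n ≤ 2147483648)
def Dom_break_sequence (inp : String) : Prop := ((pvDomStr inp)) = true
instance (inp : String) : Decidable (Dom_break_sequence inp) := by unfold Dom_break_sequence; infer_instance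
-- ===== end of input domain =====

-- B replaces A's per-character enumerate loop with a 'skips' countdown by a staged-splitting loop over str.partition;
-- equivalence is about the fully consumed generators' token lists (both Pythons raise ValueError on an unclosed '<';
-- those inputs are outside Pre_).

-- ===== PORT A =====
-- for idx, char in enumerate(inp): the skips countdown, yield accumulated in 'acc' (reversed at the end).
-- On 'raise ValueError' the port returns the tokens yielded so far (outside Pre_break_sequence).
def bsGoA (inp : String) : List (Int × Char) → Int → List String → List String
  | [], _, acc => acc.reverse
  | (idx, char) :: rest, skips, acc =>
    if skips ≠ 0 then
      bsGoA inp rest (skips - 1) acc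
    else if char = '<' then
      let closing := PySem.Str.findFrom inp ">" idx none
      if closing = -1 then acc.reverse   -- raise ValueError("Unclosed tag")
      else bsGoA inp rest (skips + (closing - idx)) (PySem.Str.slice inp (some idx) (some (closing + 1)) :: acc)
    else
      bsGoA inp rest skips (String.ofList [char] :: acc)

def break_sequence (inp : String) : List String :=
  bsGoA inp (PySem.List.enumerate inp.toList 0) 0 []

-- ===== PORT B =====
-- while True over str.partition, on the char list of the remainder. str.partition(sep) for the one-char seps '<'/'>'
-- is ported exactly, inline: head = takeWhile (≠ sep) (the text before the first sep), the separator was found iff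
-- head is shorter than the whole remainder, and the part after the separator is drop (head.length + 1).
-- 'yield from head' yields each character of head; on 'raise ValueError' the port stops with the tokens so far.
def bsGoB (cs : List Char) : List String :=
  let head := cs.takeWhile (fun c => c != '<')
  let toks := head.map (fun c => String.ofList [c])
  if h1 : head.length < cs.length then
    let rest := cs.drop (head.length + 1)
    let body := rest.takeWhile (fun c => c != '>')
    if h2 : body.length < rest.length then
      toks ++ String.ofList ('<' :: (body ++ ['>'])) :: bsGoB (rest.drop (body.length + 1))
    else toks   -- raise ValueError("Unclosed tag")
  else toks
termination_by cs.length
decreasing_by simp only [List.length_drop]; omega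

def break_sequence_alt (inp : String) : List String :=
  bsGoB inp.toList

-- ===== PRECONDITION & SPEC =====
-- Pre_ excludes exactly the inputs on which A (and B) raise ValueError: some '<' with no '>' at or after it.
def Pre_break_sequence (inp : String) : Prop :=
  ∀ i < inp.toList.length, inp.toList[i]? = some '<' →
    ∃ j < inp.toList.length, i ≤ j ∧ inp.toList[j]? = some '>'
instance (inp : String) : Decidable (Pre_break_sequence inp) := by unfold Pre_break_sequence; infer_instance

def pvWitness_break_sequence : String := "a<b c>d<e>"

def Spec_break_sequence (inp : String) (out : List String) : Prop := out = break_sequence_alt inp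
instance (inp : String) (out : List String) : Decidable (Spec_break_sequence inp out) := by unfold Spec_break_sequence; infer_instance

-- ===== CLAIM (what is proved, stated in full; the proofs are below) =====
def Claim_equal_break_sequence : Prop := ∀ (inp : String), Dom_break_sequence inp → Pre_break_sequence inp → Spec_break_sequence inp (break_sequence inp)

-- ===== LEMMAS AND PROOFS =====

lemma drop_enumerate {α : Type} : ∀ (k : Nat) (xs : List α) (s : Int),
    (PySem.List.enumerate xs s).drop k = PySem.List.enumerate (xs.drop k) (s + k) := by
  intro k
  induction k with
  | zero => simp
  | succ k ih =>
    intro xs s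
    cases xs with
    | nil => simp [PySem.List.enumerate_nil]
    | cons x xs =>
      rw [PySem.List.enumerate_cons]
      simp only [List.drop_succ_cons, Nat.cast_succ]
      rw [ih xs (s + 1), show s + 1 + (k : Int) = s + ((k : Int) + 1) from by ring]

-- consuming skips = k just drops k pairs
lemma bsGoA_skip (inp : String) : ∀ (k : Nat) (ps : List (Int × Char)) (acc : List String),
    bsGoA inp ps (k : Int) acc = bsGoA inp (ps.drop k) 0 acc := by
  intro k
  induction k with
  | zero => simp
  | succ k ih =>
    intro ps acc
    cases ps with
    | nil => simp [bsGoA]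
    | cons p rest =>
      obtain ⟨idx, char⟩ := p
      have h1 : ((k : Int) + 1) ≠ 0 := by omega
      rw [bsGoA]
      simp only [Nat.cast_succ, h1, ne_eq]
      have : (k : Int) + 1 - 1 = (k : Int) := by ring
      rw [this, ih]
      rfl

-- a one-char pattern is a prefix of l.drop m iff l[m]? is that char
lemma singleton_prefix_drop_iff (c : Char) (l : List Char) (m : Nat) :
    [c] <+: l.drop m ↔ l[m]? = some c := by
  rw [← List.head?_drop]
  constructor
  · rintro ⟨t, ht⟩
    rw [← ht]; rfl
  · intro h
    cases hd : l.drop m with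
    | nil => rw [hd] at h; simp at h
    | cons x xs =>
      rw [hd] at h; simp at h
      exact ⟨xs, by simp [hd, h]⟩

-- Chars.find points at the unique first occurrence
lemma find_char_eq (s : List Char) (c : Char) (j : Nat)
    (hhit : s[j]? = some c) (hmiss : ∀ m, m < j → s[m]? ≠ some c) :
    PySem.Chars.find s [c] = (j : Int) := by
  have hinf : [c] <:+: s := by
    have hmem : c ∈ s := List.mem_of_getElem? hhit
    obtain ⟨l₁, l₂, hsplit⟩ := List.mem_iff_append.mp hmem
    exact ⟨l₁, l₂, by simp [hsplit]⟩
  have h0 : 0 ≤ PySem.Chars.find s [c] := (PySem.Chars.find_nonneg_iff s [c]).2 hinf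
  obtain ⟨hpre, hmin⟩ := PySem.Chars.find_spec h0
  have hfj : s[(PySem.Chars.find s [c]).toNat]? = some c :=
    (singleton_prefix_drop_iff c s _).1 hpre
  have hle : j ≤ (PySem.Chars.find s [c]).toNat := by
    by_contra hlt
    exact hmiss _ (by omega) hfj
  have hge : (PySem.Chars.find s [c]).toNat ≤ j := by
    by_contra hlt
    exact hmin j (by omega) ((singleton_prefix_drop_iff c s j).2 hhit)
  omega

-- split a list at the end of its takeWhile prefix
lemma takeWhile_split {α : Type} (p : α → Bool) : ∀ (cs : List α),
    (cs.takeWhile p).length < cs.length →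
    ∃ x, p x = false ∧ cs = cs.takeWhile p ++ x :: cs.drop ((cs.takeWhile p).length + 1) := by
  intro cs
  induction cs with
  | nil => simp
  | cons a cs ih =>
    intro h
    by_cases hp : p a
    · rw [List.takeWhile_cons_of_pos hp] at h ⊢
      simp only [List.length_cons, Nat.add_lt_add_iff_right] at h
      obtain ⟨x, hx, heq⟩ := ih h
      exact ⟨x, hx, by simpa using heq⟩
    · refine ⟨a, by simpa using hp, ?_⟩
      rw [List.takeWhile_cons_of_neg hp]
      simp

lemma take_len_succ_append {α : Type} : ∀ (b : List α) (y : α) (r : List α),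
    (b ++ y :: r).take (b.length + 1) = b ++ [y] := by
  intro b y r
  induction b with
  | nil => simp
  | cons a b ih => simpa using ih

lemma bsGoB_cons_ne (c : Char) (cs : List Char) (hc : c ≠ '<') :
    bsGoB (c :: cs) = String.ofList [c] :: bsGoB cs := by
  rw [bsGoB]
  conv_rhs => rw [bsGoB]
  simp only [List.takeWhile_cons, bne_iff_ne, ne_eq, hc, not_false_eq_true, decide_true,
    if_true, List.length_cons, List.map_cons, Nat.add_lt_add_iff_right, List.drop_succ_cons]
  split_ifs <;> rfl

lemma bsGoB_nil : bsGoB [] = [] := by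
  rw [bsGoB]; simp

-- the main loop invariant: A's loop from position i computes acc.reverse ++ B on the remainder
lemma bsGoA_main (inp : String) : ∀ (fuel i : Nat) (acc : List String),
    inp.toList.length - i ≤ fuel →
    bsGoA inp (PySem.List.enumerate (inp.toList.drop i) (i : Int)) 0 acc
      = acc.reverse ++ bsGoB (inp.toList.drop i) := by
  intro fuel
  induction fuel with
  | zero =>
    intro i acc hf
    have hge : inp.toList.length ≤ i := by omega
    rw [List.drop_eq_nil_of_le hge, PySem.List.enumerate_nil, bsGoA, bsGoB_nil]
    simp
  | succ fuel ih =>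
    intro i acc hf
    by_cases h : i < inp.toList.length
    · have hdrop : inp.toList.drop i = inp.toList[i] :: inp.toList.drop (i + 1) :=
        List.drop_eq_getElem_cons h
      by_cases hc : inp.toList[i] = '<'
      · -- tag case
        rw [hc] at hdrop
        rw [hdrop, PySem.List.enumerate_cons, bsGoA]
        simp only [ne_eq, not_true_eq_false, if_false, if_pos rfl]
        set t := inp.toList.drop (i + 1) with ht
        set b := t.takeWhile (fun c => c != '>') with hbdef
        by_cases hfound : b.length < t.length
        · -- a '>' exists: both yield the tag and continue after it
          obtain ⟨x, hx, hteq⟩ := takeWhile_split (fun c => c != '>') t hfound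
          have hxgt : x = '>' := by simpa using hx
          rw [← hbdef] at hteq
          rw [hxgt] at hteq
          -- position of the '>' in inp.toList
          have hj : inp.toList[(i + 1 + b.length)]? = some '>' := by
            have : t[b.length]? = some '>' := by
              rw [hteq]
              rw [List.getElem?_append_right (by simp)]
              simp
            rw [ht, List.getElem?_drop] at this
            exact this
          have hmiss : ∀ m, m < i + 1 + b.length → i ≤ m → inp.toList[m]? ≠ some '>' := by
            intro m hm him
            by_cases hmi : m = i
            · rw [hmi]
              rw [List.getElem?_eq_getElem h, hc]
              simp
            · have h1m : i + 1 ≤ m := by omega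
              have : inp.toList[m]? = t[(m - (i+1))]? := by
                rw [ht, List.getElem?_drop]
                congr 1; omega
              rw [this]
              intro hcon
              have hmem : '>' ∈ b := by
                have hlt : m - (i+1) < b.length := by omega
                have : t[(m - (i+1))]? = b[(m - (i+1))]? := by
                  conv_lhs => rw [hteq]
                  rw [List.getElem?_append_left hlt]
                exact List.mem_of_getElem? (by rw [← this]; exact hcon)
              have := List.mem_takeWhile_imp hmem
              simp at this
          -- the find from i lands exactly on that '>'
          have hfind : PySem.Chars.find (inp.toList.drop i) ">".toList = ((1 + b.length : Nat) : Int) := by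
            have h1 : ">".toList = ['>'] := by decide
            rw [h1]
            apply find_char_eq
            · rw [List.getElem?_drop]
              rw [show i + (1 + b.length) = i + 1 + b.length from by omega]
              exact hj
            · intro m hm
              rw [List.getElem?_drop]
              exact hmiss (i + m) (by omega) (by omega)
          have hclosing : PySem.Str.findFrom inp ">" (i : Int) none = ((i + 1 + b.length : Nat) : Int) := by
            rw [PySem.Str.findFrom_eq, PySem.Chars.findFrom_natCast inp.toList ">".toList i (by omega), hfind]
            have : ((1 + b.length : Nat) : Int) ≠ -1 := by omega
            rw [if_neg this]
            push_cast; ring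
          rw [hclosing]
          rw [if_neg (show ¬((i + 1 + b.length : Nat) : Int) = -1 from by omega)]
          -- the slice is '<' :: b ++ ['>']
          have hslice : PySem.Str.slice inp (some (i : Int)) (some (((i + 1 + b.length : Nat) : Int) + 1))
              = String.ofList ('<' :: (b ++ ['>'])) := by
            have harith : ((i + 1 + b.length : Nat) : Int) + 1 = ((i : Nat) : Int) + ((b.length + 2 : Nat) : Int) := by
              push_cast; ring
            rw [harith, PySem.Str.slice]
            congr 1
            rw [PySem.Chars.slice_eq_listSlice, PySem.List.slice_natCast_add]
            rw [hdrop, hteq]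
            rw [show b.length + 2 = b.length + 1 + 1 from rfl, List.take_succ_cons,
              take_len_succ_append]
          rw [hslice]
          -- consume the skips and apply the induction hypothesis
          have hcast : (0 : Int) + (((i + 1 + b.length : Nat) : Int) - (i : Int)) = ((1 + b.length : Nat) : Int) := by
            push_cast; ring
          rw [hcast, bsGoA_skip, drop_enumerate, List.drop_drop]
          have harith1 : i + 1 + (1 + b.length) = i + 1 + b.length + 1 := by omega
          have harith2 : (i : Int) + 1 + ((1 + b.length : Nat) : Int) = ((i + 1 + b.length + 1 : Nat) : Int) := by
            push_cast; ring
          rw [harith1, harith2, ih (i + 1 + b.length + 1) _ (by omega)]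
          -- unfold one step of B
          conv_rhs => rw [bsGoB]
          rw [List.takeWhile_cons]
          simp only [show (('<' : Char) != '<') = false from by decide, Bool.false_eq_true,
            if_false, List.length_nil, List.map_nil, List.length_cons, List.drop_succ_cons,
            List.drop_zero, Nat.zero_add]
          rw [dif_pos (by omega)]
          rw [← hbdef, dif_pos hfound]
          have hrest : t.drop (b.length + 1) = inp.toList.drop (i + 1 + b.length + 1) := by
            rw [ht, List.drop_drop, show (i + 1) + (b.length + 1) = i + 1 + b.length + 1 from by omega]
          rw [hrest]
          simp
        · -- no '>' after i: A raises (closing = -1) and B stops; both give the tokens so far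
          have hnone : ¬ (">".toList <:+: inp.toList.drop i) := by
            have hbt : b = t := by
              have hle : b.length ≤ t.length := (List.takeWhile_sublist _).length_le
              exact (List.takeWhile_prefix _).eq_of_length (by rw [← hbdef]; omega)
            intro hinf
            have hmem : '>' ∈ inp.toList.drop i := by
              have : '>' ∈ (">".toList : List Char) := by decide
              exact (List.IsInfix.subset hinf) this
            rw [hdrop] at hmem
            simp only [List.mem_cons] at hmem
            rcases hmem with h1 | h2
            · exact absurd h1 (by decide)
            · have : '>' ∈ b := by rw [hbt]; exact h2
              have := List.mem_takeWhile_imp this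
              simp at this
          have hclosing : PySem.Str.findFrom inp ">" (i : Int) none = -1 :=
            (PySem.Chars.findFrom_natCast_eq_neg_one_iff inp.toList ">".toList i (by omega)).2 hnone
          rw [hclosing, if_pos rfl]
          -- B side
          conv_rhs => rw [bsGoB]
          rw [List.takeWhile_cons]
          simp only [show (('<' : Char) != '<') = false from by decide, Bool.false_eq_true,
            if_false, List.length_nil, List.map_nil, List.length_cons, List.drop_succ_cons,
            List.drop_zero, Nat.zero_add]
          rw [dif_pos (by omega)]
          rw [← hbdef, dif_neg hfound]
          simp
      · -- plain character
        rw [hdrop, PySem.List.enumerate_cons, bsGoA]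
        simp only [ne_eq, not_true_eq_false, if_false, if_neg hc]
        have harith : ((i : Int) + 1) = ((i + 1 : Nat) : Int) := by push_cast; ring
        rw [harith, ih (i + 1) _ (by omega)]
        rw [bsGoB_cons_ne _ _ hc]
        simp
    · rw [List.drop_eq_nil_of_le (by omega), PySem.List.enumerate_nil, bsGoA, bsGoB_nil]
      simp

-- ===== VERDICT (by name: the statement is the Claim_ definition above) =====
theorem break_sequence_spec : Claim_equal_break_sequence := by
  intro inp _ _
  unfold Spec_break_sequence break_sequence break_sequence_alt
  have := bsGoA_main inp inp.toList.length 0 [] (by omega)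
  simpa using this
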